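-- pv_equiv track=rewrite | github.com/KellyGong/text-to-lora | hyper_llm_modulator/utils/eval_tasks.py | get_choice
-- ===== SOURCE A (Python) =====
-- def get_choice(txt: str) -> str:
--     # txt = str(txt).strip().strip(":`'\"(.) ").lower()
--     txt = str(txt).strip().strip(":`'\"(.) *").lower()
--     CHOICES = [
--         "a",
--         "b",
--         "c",
--         "d",
--         "e",
--         "f",
--         "g",
--         "h",
--         "i",
--         "j",
--         "k",
--         "l",
--         "m",
--         "n",
--         "o",
--         "p",
--         "q",
--         "r",
--         "s",
--         "t",
--         "u",
--         "v",
--         "w",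
--         "x",
--         "y",
--         "z",
--         "0",
--         "1",
--         "2",
--         "3",
--         "4",
--         "5",
--         "6",
--         "7",
--         "8",
--         "9",
--         "10",
--     ]
--     for choice in CHOICES:
--         if txt.startswith(choice):
--             return choice
-- ===== SOURCE B (Python) =====
-- def get_choice(txt: str) -> str:
--     # Same cleaning as the original; then: every choice is decided by the first
--     # character alone ("10" is shadowed by "1"), so no scan over the choice list.
--     txt = str(txt).strip().strip(":`'\"(.) *").lower()
--     if txt and ('a' <= txt[0] <= 'z' or txt[0].isdigit()):
--         return txt[0]
-- ===== Notes on version B (the rewrite author's own statement) =====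
-- stated objective: simpler
-- what changed: Replaces the linear scan over the 37-element CHOICES list with a direct test of the cleaned string's first character (all choices are single characters except '10', which is shadowed by '1'), returning that character itself.
import Mathlib
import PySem

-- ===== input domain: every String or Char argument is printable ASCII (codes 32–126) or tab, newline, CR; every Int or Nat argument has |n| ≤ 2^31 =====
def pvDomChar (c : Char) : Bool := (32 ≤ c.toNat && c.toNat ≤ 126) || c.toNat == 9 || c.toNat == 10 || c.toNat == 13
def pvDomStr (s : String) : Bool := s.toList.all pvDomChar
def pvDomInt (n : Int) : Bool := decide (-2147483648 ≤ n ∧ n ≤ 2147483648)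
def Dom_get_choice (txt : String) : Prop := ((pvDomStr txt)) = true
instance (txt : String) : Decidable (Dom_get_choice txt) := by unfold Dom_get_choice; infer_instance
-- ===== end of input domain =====

-- B replaces A's scan over the 37-element CHOICES list by a direct test of the
-- cleaned string's first character (objective: simpler).

-- ===== PORT A =====
def get_choice_CHOICES : List String :=
  ["a","b","c","d","e","f","g","h","i","j","k","l","m",
   "n","o","p","q","r","s","t","u","v","w","x","y","z",
   "0","1","2","3","4","5","6","7","8","9","10"]

-- the 'for choice in CHOICES: if txt.startswith(choice): return choice' loop
def get_choice_loop (t : String) : List String → Option String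
  | [] => none
  | c :: cs => if PySem.Str.startswith t c then some c else get_choice_loop t cs

def get_choice (txt : String) : Option String :=
  let t := PySem.Str.lower (PySem.Str.stripChars (PySem.Str.strip txt) ":`'\"(.) *")
  get_choice_loop t get_choice_CHOICES

-- ===== PORT B =====
-- 'txt and (...)' + 'return txt[0]'; Python's "'a' <= txt[0] <= 'z'" on 1-char
-- strings is exactly the Char comparison.
-- the test+return line: 'if txt and ('a' <= txt[0] <= 'z' or txt[0].isdigit()): return txt[0]'
def get_choice_alt_first (t : String) : Option String :=
  match PySem.Str.pyGet? t 0 with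
  | none => none
  | some c =>
      if (decide ('a' ≤ c) && decide (c ≤ 'z')) || PySem.Chars.isdigit c then
        some (String.ofList [c])
      else none

def get_choice_alt (txt : String) : Option String :=
  get_choice_alt_first (PySem.Str.lower (PySem.Str.stripChars (PySem.Str.strip txt) ":`'\"(.) *"))

-- ===== PRECONDITION & SPEC =====
def Spec_get_choice (txt : String) (out : Option String) : Prop := out = get_choice_alt txt
instance (txt : String) (out : Option String) : Decidable (Spec_get_choice txt out) := by unfold Spec_get_choice; infer_instance

-- ===== CLAIM (what is proved, stated in full; the proofs are below) =====
def Claim_equal_get_choice : Prop := ∀ (txt : String), Dom_get_choice txt → Spec_get_choice txt (get_choice txt)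

-- ===== LEMMAS AND PROOFS =====

set_option maxHeartbeats 1600000 in
theorem get_choice_loop_head (t : String) :
    get_choice_loop t get_choice_CHOICES = get_choice_alt_first t := by
  unfold get_choice_alt_first
  cases h : t.toList with
  | nil =>
      simp [get_choice_loop, get_choice_CHOICES, PySem.Str.pyGet?, PySem.Chars.pyGet?,
        PySem.List.pyGet?, PySem.Chars.startswith, h]
  | cons c r =>
      simp only [get_choice_loop, get_choice_CHOICES, PySem.Str.startswith_eq, h,
        String.reduceToList, PySem.Chars.startswith, List.isPrefixOf, Bool.and_true,
        PySem.Str.pyGet?_eq, PySem.Chars.pyGet?_eq_listPyGet?, PySem.List.pyGet?,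
        PySem.List.pyIdx?]
      norm_num
      by_cases h1 : 'a' = c
      · subst h1; simp [PySem.Chars.isdigit]
      rw [if_neg h1]
      by_cases h2 : 'b' = c
      · subst h2; simp [PySem.Chars.isdigit]
      rw [if_neg h2]
      by_cases h3 : 'c' = c
      · subst h3; simp [PySem.Chars.isdigit]
      rw [if_neg h3]
      by_cases h4 : 'd' = c
      · subst h4; simp [PySem.Chars.isdigit]
      rw [if_neg h4]
      by_cases h5 : 'e' = c
      · subst h5; simp [PySem.Chars.isdigit]
      rw [if_neg h5]
      by_cases h6 : 'f' = c
      · subst h6; simp [PySem.Chars.isdigit]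
      rw [if_neg h6]
      by_cases h7 : 'g' = c
      · subst h7; simp [PySem.Chars.isdigit]
      rw [if_neg h7]
      by_cases h8 : 'h' = c
      · subst h8; simp [PySem.Chars.isdigit]
      rw [if_neg h8]
      by_cases h9 : 'i' = c
      · subst h9; simp [PySem.Chars.isdigit]
      rw [if_neg h9]
      by_cases h10 : 'j' = c
      · subst h10; simp [PySem.Chars.isdigit]
      rw [if_neg h10]
      by_cases h11 : 'k' = c
      · subst h11; simp [PySem.Chars.isdigit]
      rw [if_neg h11]
      by_cases h12 : 'l' = c
      · subst h12; simp [PySem.Chars.isdigit]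
      rw [if_neg h12]
      by_cases h13 : 'm' = c
      · subst h13; simp [PySem.Chars.isdigit]
      rw [if_neg h13]
      by_cases h14 : 'n' = c
      · subst h14; simp [PySem.Chars.isdigit]
      rw [if_neg h14]
      by_cases h15 : 'o' = c
      · subst h15; simp [PySem.Chars.isdigit]
      rw [if_neg h15]
      by_cases h16 : 'p' = c
      · subst h16; simp [PySem.Chars.isdigit]
      rw [if_neg h16]
      by_cases h17 : 'q' = c
      · subst h17; simp [PySem.Chars.isdigit]
      rw [if_neg h17]
      by_cases h18 : 'r' = c
      · subst h18; simp [PySem.Chars.isdigit]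
      rw [if_neg h18]
      by_cases h19 : 's' = c
      · subst h19; simp [PySem.Chars.isdigit]
      rw [if_neg h19]
      by_cases h20 : 't' = c
      · subst h20; simp [PySem.Chars.isdigit]
      rw [if_neg h20]
      by_cases h21 : 'u' = c
      · subst h21; simp [PySem.Chars.isdigit]
      rw [if_neg h21]
      by_cases h22 : 'v' = c
      · subst h22; simp [PySem.Chars.isdigit]
      rw [if_neg h22]
      by_cases h23 : 'w' = c
      · subst h23; simp [PySem.Chars.isdigit]
      rw [if_neg h23]
      by_cases h24 : 'x' = c
      · subst h24; simp [PySem.Chars.isdigit]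
      rw [if_neg h24]
      by_cases h25 : 'y' = c
      · subst h25; simp [PySem.Chars.isdigit]
      rw [if_neg h25]
      by_cases h26 : 'z' = c
      · subst h26; simp [PySem.Chars.isdigit]
      rw [if_neg h26]
      by_cases h27 : '0' = c
      · subst h27; simp [PySem.Chars.isdigit]
      rw [if_neg h27]
      by_cases h28 : '1' = c
      · subst h28; simp [PySem.Chars.isdigit]
      rw [if_neg h28]
      by_cases h29 : '2' = c
      · subst h29; simp [PySem.Chars.isdigit]
      rw [if_neg h29]
      by_cases h30 : '3' = c
      · subst h30; simp [PySem.Chars.isdigit]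
      rw [if_neg h30]
      by_cases h31 : '4' = c
      · subst h31; simp [PySem.Chars.isdigit]
      rw [if_neg h31]
      by_cases h32 : '5' = c
      · subst h32; simp [PySem.Chars.isdigit]
      rw [if_neg h32]
      by_cases h33 : '6' = c
      · subst h33; simp [PySem.Chars.isdigit]
      rw [if_neg h33]
      by_cases h34 : '7' = c
      · subst h34; simp [PySem.Chars.isdigit]
      rw [if_neg h34]
      by_cases h35 : '8' = c
      · subst h35; simp [PySem.Chars.isdigit]
      rw [if_neg h35]
      by_cases h36 : '9' = c
      · subst h36; simp [PySem.Chars.isdigit]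
      rw [if_neg h36]
      rw [if_neg (fun hx => h28 hx.1)]
      have hnc : ¬('a' ≤ c ∧ c ≤ 'z' ∨ PySem.Chars.isdigit c = true) := by
        simp [PySem.Chars.isdigit, Char.le_def, Char.ext_iff,
          UInt32.le_iff_toNat_le, ← UInt32.toNat_inj] at *
        omega
      rw [if_neg hnc]

-- ===== VERDICT (by name: the statement is the Claim_ definition above) =====
theorem get_choice_spec : Claim_equal_get_choice := by
  intro txt _
  show get_choice txt = get_choice_alt txt
  simp only [get_choice, get_choice_alt]
  exact get_choice_loop_head _
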